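-- pv_equiv track=rewrite | github.com/allbizsupplies/pxi | pxi/analysis.py | compare_terms
-- ===== SOURCE A (Python) =====
-- def compare_terms(a_terms, b_terms):
--     """
--     Compares two lists of terms by counting the following:
--
--     - misses: the terms found in one list but not the other
--     - hits: the terms found in both lists
--     - direct_hits: the terms found in the same position in both lists
--     """
--     length_difference = len(b_terms) - len(a_terms)
--     # Make the shorter terms the first terms.
--     if length_difference >= 0:
--         first_terms = a_terms
--         second_terms = b_terms
--     else:
--         first_terms = b_terms
--         second_terms = a_terms
--     misses = abs(length_difference)
--     direct_hits = 0
--     hits = 0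
--     for i, term in enumerate(first_terms):
--         if term == second_terms[i]:
--             direct_hits += 1
--             hits += 1
--         elif term in second_terms:
--             hits += 1
--         else:
--             misses += 1
--     return {
--         "direct_hits": direct_hits,
--         "hits": hits,
--         "misses": misses,
--     }
-- ===== SOURCE B (Python) =====
-- def compare_terms(a_terms, b_terms):
--     if len(a_terms) <= len(b_terms):
--         first, second = a_terms, b_terms
--     else:
--         first, second = b_terms, a_terms
--     # Count each distinct term of the shorter list once, index the longer list as a set,
--     # then sum the multiplicities of the terms in the intersection.
--     counts = {}
--     for t in first:
--         counts[t] = counts.get(t, 0) + 1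
--     second_set = set(second)
--     hits = 0
--     for t, n in counts.items():
--         if t in second_set:
--             hits += n
--     direct_hits = sum(1 for x, y in zip(first, second) if x == y)
--     return {
--         "direct_hits": direct_hits,
--         "hits": hits,
--         "misses": len(second) - hits,
--     }
-- ===== Notes on version B (the rewrite author's own statement) =====
-- stated objective: faster
-- what changed: Replaces A's fused scan with per-element list membership by a hash-based algorithm: build a frequency dict of the shorter list and a set of the longer list once, compute hits as the summed multiplicities of the distinct terms in the intersection, direct_hits by a zip pass, and misses arithmetically as len(second) - hits.
import Mathlib
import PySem

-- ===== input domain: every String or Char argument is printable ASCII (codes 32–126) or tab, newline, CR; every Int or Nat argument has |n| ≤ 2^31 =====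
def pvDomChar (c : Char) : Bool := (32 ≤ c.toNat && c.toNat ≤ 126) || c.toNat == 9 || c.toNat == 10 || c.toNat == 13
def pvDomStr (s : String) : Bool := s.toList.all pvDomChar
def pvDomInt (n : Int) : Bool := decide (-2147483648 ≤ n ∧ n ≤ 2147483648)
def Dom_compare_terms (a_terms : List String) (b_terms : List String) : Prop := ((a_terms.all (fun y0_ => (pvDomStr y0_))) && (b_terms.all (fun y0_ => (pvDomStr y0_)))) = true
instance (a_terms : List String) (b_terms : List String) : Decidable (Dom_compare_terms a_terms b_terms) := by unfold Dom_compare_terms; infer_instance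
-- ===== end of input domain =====

-- B replaces A's fused scan (list membership per element) by a hash-based algorithm:
-- a frequency dict of the shorter list plus a set of the longer one, hits summed over
-- the distinct terms of the intersection, misses derived arithmetically.

-- ===== PORT A =====
-- loop body of A's 'for i, term in enumerate(first_terms)'; state = (direct_hits, hits, misses).
-- The 'none' branch (IndexError) is unreachable: i < len(first_terms) ≤ len(second_terms).
def ctBody (second_terms : List String) (acc : Int × Int × Int) (p : Int × String) : Int × Int × Int :=
  match PySem.List.pyGet? second_terms p.1 with
  | some v =>
    if p.2 == v then (acc.1 + 1, acc.2.1 + 1, acc.2.2)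
    else if second_terms.contains p.2 then (acc.1, acc.2.1 + 1, acc.2.2)
    else (acc.1, acc.2.1, acc.2.2 + 1)
  | none => acc

def compare_terms (a_terms : List String) (b_terms : List String) : List (String × Int) :=
  let length_difference : Int := (b_terms.length : Int) - (a_terms.length : Int)
  let first_terms := if 0 ≤ length_difference then a_terms else b_terms
  let second_terms := if 0 ≤ length_difference then b_terms else a_terms
  let r := (PySem.List.enumerate first_terms).foldl (ctBody second_terms) (0, 0, |length_difference|)
  [("direct_hits", r.1), ("hits", r.2.1), ("misses", r.2.2)]

-- ===== PORT B =====
def compare_terms_alt (a_terms : List String) (b_terms : List String) : List (String × Int) :=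
  let fs := if a_terms.length ≤ b_terms.length then (a_terms, b_terms) else (b_terms, a_terms)
  let first := fs.1
  let second := fs.2
  -- counts[t] = counts.get(t, 0) + 1
  let counts := first.foldl (fun d t => d.insert t (d.getD t 0 + 1)) (PySem.Dict.empty : PySem.Dict String Int)
  let second_set := PySem.Set.ofList second
  -- for t, n in counts.items(): if t in second_set: hits += n
  let hits : Int := counts.items.foldl (fun acc p => if PySem.Set.contains second_set p.1 then acc + p.2 else acc) 0
  let direct_hits : Int := (((first.zip second).filter (fun p => p.1 == p.2)).length : Int)
  [("direct_hits", direct_hits), ("hits", hits), ("misses", (second.length : Int) - hits)]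

-- ===== PRECONDITION & SPEC =====
def Spec_compare_terms (a_terms : List String) (b_terms : List String) (out : List (String × Int)) : Prop := out = compare_terms_alt a_terms b_terms
instance (a_terms : List String) (b_terms : List String) (out : List (String × Int)) : Decidable (Spec_compare_terms a_terms b_terms out) := by unfold Spec_compare_terms; infer_instance

-- ===== CLAIM (what is proved, stated in full; the proofs are below) =====
def Claim_equal_compare_terms : Prop := ∀ (a_terms : List String) (b_terms : List String), Dom_compare_terms a_terms b_terms → Spec_compare_terms a_terms b_terms (compare_terms a_terms b_terms)

-- ===== LEMMAS AND PROOFS =====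

-- A's loop, characterised: it adds the positional-match count, the membership count,
-- and the non-membership count of first to the accumulator.
lemma ct_loop (f : List String) : ∀ (pre rest : List String) (acc : Int × Int × Int),
    f.length ≤ rest.length →
    (PySem.List.enumerate f (pre.length : Int)).foldl (ctBody (pre ++ rest)) acc =
      (acc.1 + (((f.zip rest).filter (fun p => p.1 == p.2)).length : Int),
       acc.2.1 + ((f.filter (fun t => (pre ++ rest).contains t)).length : Int),
       acc.2.2 + ((f.filter (fun t => !(pre ++ rest).contains t)).length : Int)) := by
  induction f with
  | nil => intro pre rest acc _; simp [PySem.List.enumerate_nil]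
  | cons t f' ih =>
    intro pre rest acc hlen
    cases rest with
    | nil => simp at hlen
    | cons r rest' =>
      rw [PySem.List.enumerate_cons]
      simp only [List.foldl_cons]
      have hget : PySem.List.pyGet? (pre ++ r :: rest') ((pre.length : Int)) = some r := by
        rw [PySem.List.pyGet?_natCast]; simp
      have hstart : (pre.length : Int) + 1 = (((pre ++ [r]).length : Nat) : Int) := by
        simp
      have happ : (pre ++ [r]) ++ rest' = pre ++ r :: rest' := by simp
      have ih' := ih (pre ++ [r]) rest' (ctBody (pre ++ r :: rest') acc ((pre.length : Int), t))
        (by simpa using Nat.le_of_succ_le_succ hlen)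
      rw [happ] at ih'
      rw [hstart, ih']
      unfold ctBody
      simp only [hget]
      by_cases heq : t = r
      · subst heq
        have hc : (pre ++ t :: rest').contains t = true := by simp
        simp only [beq_self_eq_true, if_true, hc, List.zip_cons_cons, List.filter_cons]
        exact Prod.ext (by simp; ring) (Prod.ext (by simp; ring) (by simp))
      · have hne : (t == r) = false := by simp [heq]
        simp only [List.zip_cons_cons, List.filter_cons, hne]
        by_cases hc : (pre ++ r :: rest').contains t = true
        · simp only [hc, if_true]
          exact Prod.ext (by simp) (Prod.ext (by simp; ring) (by simp))
        · have hc' : (pre ++ r :: rest').contains t = false := by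
            cases h : (pre ++ r :: rest').contains t
            · rfl
            · exact absurd h hc
          simp only [hc']
          exact Prod.ext (by simp) (Prod.ext (by simp) (by simp; ring))

lemma filter_split {α : Type} (p : α → Bool) (f : List α) :
    (f.filter p).length + (f.filter (fun a => !p a)).length = f.length := by
  induction f with
  | nil => simp
  | cons t f' ih =>
    simp only [List.filter_cons]
    cases h : p t <;> (simp; omega)

lemma compare_terms_eq_core (first second : List String) (h : first.length ≤ second.length) :
    (PySem.List.enumerate first ((0:Nat) : Int)).foldl (ctBody second)
        (0, 0, |((second.length : Int) - (first.length : Int))|) =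
      ((((first.zip second).filter (fun p => p.1 == p.2)).length : Int),
       ((first.filter (fun t => second.contains t)).length : Int),
       (second.length : Int) - ((first.filter (fun t => second.contains t)).length : Int)) := by
  have hl := ct_loop first [] second (0, 0, |((second.length : Int) - (first.length : Int))|) h
  simp only [List.nil_append, List.length_nil] at hl
  rw [hl]
  have habs : |((second.length : Int) - (first.length : Int))|
      = (second.length : Int) - (first.length : Int) := by
    rw [abs_of_nonneg]; omega
  have hsum := filter_split (fun t => second.contains t) first
  refine Prod.ext (by simp) (Prod.ext (by simp) ?_)
  simp only [habs]
  omega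

-- B's hits loop as a map-sum.
lemma hits_foldl_eq_sum (c : String → Bool) :
    ∀ (items : List (String × Int)) (acc : Int),
    items.foldl (fun acc p => if c p.1 then acc + p.2 else acc) acc =
      acc + (items.map (fun p => if c p.1 then p.2 else 0)).sum := by
  intro items
  induction items with
  | nil => intro acc; simp
  | cons q qs ih =>
    intro acc
    simp only [List.foldl_cons, List.map_cons, List.sum_cons, ih]
    by_cases h : c q.1 = true <;> simp [h, add_assoc, add_comm, add_left_comm]

lemma sum_single {α : Type} [DecidableEq α] (x : α) (c : Int) :
    ∀ (ks : List α), ks.Nodup → x ∈ ks →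
    (ks.map (fun k => if k = x then c else 0)).sum = c := by
  intro ks
  induction ks with
  | nil => intro _ h; simp at h
  | cons k ks' ih =>
    intro hnd hmem
    simp only [List.map_cons, List.sum_cons]
    by_cases hkx : k = x
    · subst hkx
      have hz : (ks'.map (fun k' => if k' = k then c else 0)).sum = 0 := by
        rw [List.sum_eq_zero]
        intro y hy
        obtain ⟨k', hk', rfl⟩ := List.mem_map.mp hy
        have hne : ¬ (k' = k) := fun he => (List.nodup_cons.mp hnd).1 (he ▸ hk')
        simp [hne]
      simp [hz]
    · have hx' : x ∈ ks' := by
        rcases List.mem_cons.mp hmem with h | h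
        · exact absurd h.symm hkx
        · exact h
      rw [if_neg hkx, ih (List.nodup_cons.mp hnd).2 hx']
      ring

-- the key counting fact: summing the multiplicities of the distinct terms satisfying c
-- equals counting the occurrences satisfying c.
lemma sum_counts_eq_countP (c : String → Bool) :
    ∀ (l ks : List String), ks.Nodup → (∀ x ∈ l, x ∈ ks) →
    (ks.map (fun k => if c k then (l.count k : Int) else 0)).sum = (l.countP c : Int) := by
  intro l
  induction l with
  | nil => intro ks _ _; simp
  | cons x xs ih =>
    intro ks hnd hsub
    have hx : x ∈ ks := hsub x (List.mem_cons_self)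
    have hsub' : ∀ y ∈ xs, y ∈ ks := fun y hy => hsub y (List.mem_cons_of_mem _ hy)
    have hsplit : (ks.map (fun k => if c k then ((x :: xs).count k : Int) else 0)).sum =
        (ks.map (fun k => if c k then (xs.count k : Int) else 0)).sum +
        (ks.map (fun k => if k = x then (if c x then (1:Int) else 0) else 0)).sum := by
      rw [← List.sum_map_add]
      congr 1
      apply List.map_congr_left
      intro k _
      simp only [List.count_cons]
      by_cases hkx : k = x
      · subst hkx
        by_cases hc : c k = true <;> simp [hc]
      · have hbe : (x == k) = false := beq_eq_false_iff_ne.mpr (fun h => hkx h.symm)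
        simp [hbe, hkx]
    rw [hsplit, ih ks hnd hsub', sum_single x _ ks hnd hx]
    simp only [List.countP_cons]
    by_cases hc : c x = true <;> simp [hc]

-- B's hits value equals A's membership count.
lemma hits_eq (first second : List String) :
    ((first.foldl (fun d t => d.insert t (d.getD t 0 + 1)) (PySem.Dict.empty : PySem.Dict String Int)).items.foldl
        (fun acc p => if PySem.Set.contains (PySem.Set.ofList second) p.1 then acc + p.2 else acc) 0) =
      ((first.filter (fun t => second.contains t)).length : Int) := by
  rw [PySem.Dict.foldl_insert_getD_add_one_eq_counter, PySem.Dict.items_counter,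
    hits_foldl_eq_sum, List.map_map]
  have hmap : ((PySem.Set.ofList first).map
      ((fun p : String × Int => if PySem.Set.contains (PySem.Set.ofList second) p.1 then p.2 else 0) ∘
        fun k => (k, (first.count k : Int)))) =
      ((PySem.Set.ofList first).map (fun k => if second.contains k then (first.count k : Int) else 0)) := by
    apply List.map_congr_left
    intro k _
    simp [Function.comp]
  rw [hmap, sum_counts_eq_countP (fun t => second.contains t) first (PySem.Set.ofList first)
      (PySem.Set.nodup_ofList first) (fun x hx => (PySem.Set.mem_ofList first x).mpr hx)]
  simp [List.countP_eq_length_filter]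

-- ===== VERDICT (by name: the statement is the Claim_ definition above) =====
theorem compare_terms_spec : Claim_equal_compare_terms := by
  intro a_terms b_terms _
  unfold Spec_compare_terms compare_terms compare_terms_alt
  by_cases h : a_terms.length ≤ b_terms.length
  · have h0 : (0:Int) ≤ (b_terms.length : Int) - (a_terms.length : Int) := by
      omega
    simp only [h0, if_pos, h]
    have hc := compare_terms_eq_core a_terms b_terms h
    simp only [Nat.cast_zero] at hc
    rw [hc, hits_eq a_terms b_terms]
  · have h0 : ¬ (0:Int) ≤ (b_terms.length : Int) - (a_terms.length : Int) := by
      omega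
    simp only [h0, if_false, h]
    have hba : b_terms.length ≤ a_terms.length := by omega
    have hc := compare_terms_eq_core b_terms a_terms hba
    simp only [Nat.cast_zero] at hc
    have habs : |((b_terms.length : Int) - (a_terms.length : Int))|
        = |((a_terms.length : Int) - (b_terms.length : Int))| := abs_sub_comm _ _
    rw [habs, hc, hits_eq b_terms a_terms]
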